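-- pv_equiv track=rewrite | github.com/jgeiser47/AoC_2023 | Day09/Day9.py | __get_updated_list_v2
-- ===== SOURCE A (Python) =====
-- def __get_updated_list_v2(line):
--     '''
--     Helper function for part 2
--     '''
--
--     # Base case
--     if (all(x == 0 for x in line)):
--         return line + [0]
--
--     # Recursive case
--     new_line = []
--     for i in range(len(line)-1):
--         new_line.append(line[i+1] - line[i])
--
--     # Prepend to front of list
--     updated_new_line = __get_updated_list_v2(new_line)
--     line.insert(0, line[0] - updated_new_line[0])
--
--     return line
-- ===== SOURCE B (Python) =====
-- def __get_updated_list_v2(line):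
--     '''
--     Helper function for part 2 (closed form): the prepended value is the
--     alternating binomial sum  sum_j (-1)**j * C(n, j+1) * line[j].
--     '''
--     n = len(line)
--     p = 0
--     c = n          # C(n, 1)
--     sign = 1       # (-1)**j
--     j = 0
--     for a in line:
--         p += sign * c * a
--         c = c * (n - j - 1) // (j + 2)   # C(n, j+2)
--         sign = -sign
--         j += 1
--     line.insert(0, p)
--     return line
-- ===== Notes on version B (the rewrite author's own statement) =====
-- stated objective: faster
-- what changed: Replaces A's recursive construction of the whole finite-difference table (a quadratic number of subtractions) by the closed-form alternating binomial sum p = sum_j (-1)^j * C(n, j+1) * line[j], computed in a single pass that updates the binomial coefficient incrementally, then prepends p.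
import Mathlib
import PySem

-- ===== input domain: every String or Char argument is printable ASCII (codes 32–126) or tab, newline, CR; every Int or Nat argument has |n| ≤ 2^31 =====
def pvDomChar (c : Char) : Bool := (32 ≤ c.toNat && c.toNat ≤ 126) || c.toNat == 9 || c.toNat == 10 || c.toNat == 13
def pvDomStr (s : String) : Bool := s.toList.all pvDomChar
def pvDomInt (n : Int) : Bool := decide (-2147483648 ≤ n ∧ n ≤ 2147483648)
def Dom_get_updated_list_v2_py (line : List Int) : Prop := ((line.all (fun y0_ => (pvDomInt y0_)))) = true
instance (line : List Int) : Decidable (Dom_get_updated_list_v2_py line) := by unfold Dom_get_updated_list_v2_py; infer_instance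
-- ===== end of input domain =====

-- B replaces A's O(n^2) recursive difference-table with the one-pass alternating binomial
-- sum for the prepended value (measured faster). Both A and B prepend to the caller's list
-- in place (Python side); the equivalence proved here is about the return value.

-- ===== PORT A =====
def get_updated_list_v2_py (line : List Int) : List Int :=
  if line.all (fun x => x == 0) then
    line ++ [0]
  else
    -- all list indices below are always in range, so the total pyGetD is exact here
    let new_line := (PySem.List.pyRange 0 (PySem.List.len line - 1) 1).foldl
      (fun acc i => acc ++ [PySem.List.pyGetD line (i + 1) 0 - PySem.List.pyGetD line i 0]) []
    let updated_new_line := get_updated_list_v2_py new_line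
    (PySem.List.pyGetD line 0 0 - PySem.List.pyGetD updated_new_line 0 0) :: line
termination_by line.length
decreasing_by
  have hne : line ≠ [] := by
    rintro rfl; simp_all
  obtain ⟨m, hm⟩ : ∃ m, line.length = m + 1 :=
    ⟨line.length - 1, (Nat.succ_pred_eq_of_pos (List.length_pos_iff.mpr hne)).symm⟩
  have hlen : PySem.List.len line - 1 = (m : Int) := by
    rw [PySem.List.len_eq, hm]; push_cast; ring
  simp only [hlen, PySem.List.pyRange_zero_natCast,
    PySem.List.foldl_append_singleton_eq_map, List.nil_append, List.length_map,
    List.length_range, hm]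
  omega

-- ===== PORT B =====
-- state = (p, c, sign, j) exactly as in Source B's loop
def get_updated_list_v2_py_alt (line : List Int) : List Int :=
  let n : Int := PySem.List.len line
  let st := line.foldl
    (fun (s : Int × Int × Int × Int) a =>
      (s.1 + s.2.2.1 * s.2.1 * a,
       PySem.Int.floordiv (s.2.1 * (n - s.2.2.2 - 1)) (s.2.2.2 + 2),
       -s.2.2.1,
       s.2.2.2 + 1))
    (0, n, 1, 0)
  st.1 :: line

-- ===== PRECONDITION & SPEC =====
def Spec_get_updated_list_v2_py (line : List Int) (out : List Int) : Prop := out = get_updated_list_v2_py_alt line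
instance (line : List Int) (out : List Int) : Decidable (Spec_get_updated_list_v2_py line out) := by unfold Spec_get_updated_list_v2_py; infer_instance

-- ===== CLAIM (what is proved, stated in full; the proofs are below) =====
def Claim_equal_get_updated_list_v2_py : Prop := ∀ (line : List Int), Dom_get_updated_list_v2_py line → Spec_get_updated_list_v2_py line (get_updated_list_v2_py line)

-- ===== LEMMAS AND PROOFS =====

-- The common value both programs prepend: the alternating binomial sum.
def pvP (line : List Int) : Int :=
  ∑ j ∈ Finset.range line.length,
    (-1 : Int) ^ j * (line.length.choose (j + 1) : Int) * line.getD j 0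

-- all-zero list: appending 0 at the back equals prepending 0 at the front
lemma pvAllZero_append (line : List Int) (h : line.all (fun x => x == 0) = true) :
    line ++ [0] = 0 :: line := by
  induction line with
  | nil => rfl
  | cons x t ih =>
    simp only [List.all_cons, Bool.and_eq_true, beq_iff_eq] at h
    obtain ⟨rfl, ht⟩ := h
    simpa using ih ht

lemma pvAllZero_P (line : List Int) (h : line.all (fun x => x == 0) = true) :
    pvP line = 0 := by
  apply Finset.sum_eq_zero
  intro j hj
  rw [Finset.mem_range] at hj
  have hz : line.getD j 0 = 0 := by
    rw [List.getD_eq_getElem _ _ hj]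
    have := List.all_eq_true.mp h _ (line.getElem_mem hj)
    simpa using this
  rw [hz]; ring

-- the Pascal-identity step: P line = line[0] - P (diffs line)
lemma pvCore (m : ℕ) (a : ℕ → Int) :
    (∑ j ∈ Finset.range (m + 1), (-1 : Int) ^ j * ((m + 1).choose (j + 1) : Int) * a j)
      = a 0 - ∑ j ∈ Finset.range m, (-1 : Int) ^ j * ((m.choose (j + 1) : Int)) * (a (j + 1) - a j) := by
  rw [Finset.sum_range_succ' (fun j => (-1 : Int) ^ j * ((m + 1).choose (j + 1) : Int) * a j) m]
  have h3 : (∑ j ∈ Finset.range m, (-1 : Int) ^ j * ((m.choose (j + 1) : Int)) * a j)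
      = ∑ j ∈ Finset.range m, (-1 : Int) ^ (j + 1) * ((m.choose (j + 2) : Int)) * a (j + 1)
        + (m.choose 1 : Int) * a 0 := by
    have hext : (∑ j ∈ Finset.range m, (-1 : Int) ^ j * ((m.choose (j + 1) : Int)) * a j)
        = ∑ j ∈ Finset.range (m + 1), (-1 : Int) ^ j * ((m.choose (j + 1) : Int)) * a j := by
      rw [Finset.sum_range_succ]
      simp [Nat.choose_succ_self]
    rw [hext, Finset.sum_range_succ' (fun j => (-1 : Int) ^ j * ((m.choose (j + 1) : Int)) * a j) m]
    simp
  have hsplit : (∑ j ∈ Finset.range m, (-1 : Int) ^ j * ((m.choose (j + 1) : Int)) * (a (j + 1) - a j))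
      = (∑ j ∈ Finset.range m, (-1 : Int) ^ j * ((m.choose (j + 1) : Int)) * a (j + 1))
        - (∑ j ∈ Finset.range m, (-1 : Int) ^ j * ((m.choose (j + 1) : Int)) * a j) := by
    rw [← Finset.sum_sub_distrib]
    apply Finset.sum_congr rfl
    intro j _; ring
  rw [hsplit, h3]
  have hsum : (∑ j ∈ Finset.range m, (-1 : Int) ^ (j + 1) * (((m + 1).choose (j + 2) : Int)) * a (j + 1))
      = (∑ j ∈ Finset.range m, ((-1 : Int) ^ (j + 1) * ((m.choose (j + 2) : Int)) * a (j + 1)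
          - (-1 : Int) ^ j * ((m.choose (j + 1) : Int)) * a (j + 1))) := by
    apply Finset.sum_congr rfl
    intro j _
    have hp : (m + 1).choose (j + 2) = m.choose (j + 1) + m.choose (j + 2) :=
      Nat.choose_succ_succ' m (j + 1)
    rw [hp]
    push_cast
    ring
  simp only [hsum, Finset.sum_sub_distrib]
  simp [Nat.choose_one_right]
  ring

lemma pvA_eq (line : List Int) : get_updated_list_v2_py line = pvP line :: line := by
  fun_induction get_updated_list_v2_py line with
  | case1 line h =>
    rw [pvAllZero_append _ h, pvAllZero_P _ h]
  | case2 line h new_line updated ih =>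
    have hne : line ≠ [] := by rintro rfl; simp_all
    obtain ⟨m, hm⟩ : ∃ m, line.length = m + 1 :=
      ⟨line.length - 1, (Nat.succ_pred_eq_of_pos (List.length_pos_iff.mpr hne)).symm⟩
    have hlen : PySem.List.len line - 1 = (m : Int) := by
      rw [PySem.List.len_eq, hm]; push_cast; ring
    have hd : new_line = (List.range m).map (fun i => line.getD (i + 1) 0 - line.getD i 0) := by
      show (PySem.List.pyRange 0 (PySem.List.len line - 1)).foldl _ [] = _
      rw [hlen, PySem.List.pyRange_zero_natCast, PySem.List.foldl_append_singleton_eq_map,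
        List.nil_append, List.map_map]
      apply List.map_congr_left
      intro i hi
      have h1 : ((i : Int) + 1) = ((i + 1 : ℕ) : Int) := by push_cast; ring
      simp only [Function.comp, h1, PySem.List.pyGetD_natCast]
    have hP2 : pvP new_line
        = ∑ j ∈ Finset.range m,
            (-1 : Int) ^ j * ((m.choose (j + 1) : Int)) * (line.getD (j + 1) 0 - line.getD j 0) := by
      rw [hd]; unfold pvP
      simp only [List.length_map, List.length_range]
      refine Finset.sum_congr rfl (fun j hj => ?_)
      rw [Finset.mem_range] at hj
      rw [PySem.List.getD_map_range _ _ _ _ hj]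
    have hP1 : pvP line = line.getD 0 0 - pvP new_line := by
      rw [hP2]
      unfold pvP
      rw [hm]
      simpa using pvCore m (fun j => line.getD j 0)
    show (PySem.List.pyGetD line 0 0 - PySem.List.pyGetD (get_updated_list_v2_py new_line) 0 0) :: line
        = pvP line :: line
    rw [ih, PySem.List.pyGetD_zero_cons, PySem.List.pyGetD_zero, hP1]

-- binomial-coefficient update step in B's loop is exact
lemma pvChooseStep (N j : ℕ) :
    PySem.Int.floordiv ((N.choose (j + 1) : Int) * ((N : Int) - (j : Int) - 1)) ((j : Int) + 2)
      = (N.choose (j + 2) : Int) := by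
  by_cases h : j + 1 ≤ N
  · have h1 : (N : Int) - (j : Int) - 1 = ((N - (j + 1) : ℕ) : Int) := by
      push_cast [Nat.cast_sub h]; ring
    have h2 : ((j : Int) + 2) = ((j + 2 : ℕ) : Int) := by push_cast; ring
    have h3 : N.choose (j + 1) * (N - (j + 1)) = N.choose (j + 2) * (j + 2) :=
      (Nat.choose_succ_right_eq N (j + 1)).symm
    rw [h1, h2, ← Nat.cast_mul, h3, PySem.Int.floordiv_natCast,
      Nat.mul_div_cancel _ (by omega)]
  · have h1 : N.choose (j + 1) = 0 := Nat.choose_eq_zero_of_lt (by omega)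
    have h2 : N.choose (j + 2) = 0 := Nat.choose_eq_zero_of_lt (by omega)
    rw [h1, h2]
    norm_num
    have hz := PySem.Int.floordiv_natCast 0 (j + 2)
    push_cast at hz ⊢
    simpa using hz

lemma pvFoldB (N : ℕ) (l : List Int) : ∀ (p : Int) (j : ℕ),
    (l.foldl
      (fun (s : Int × Int × Int × Int) a =>
        (s.1 + s.2.2.1 * s.2.1 * a,
         PySem.Int.floordiv (s.2.1 * ((N : Int) - s.2.2.2 - 1)) (s.2.2.2 + 2),
         -s.2.2.1,
         s.2.2.2 + 1))
      (p, (N.choose (j + 1) : Int), (-1 : Int) ^ j, (j : Int))).1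
    = p + ∑ k ∈ Finset.range l.length,
        (-1 : Int) ^ (j + k) * (N.choose (j + k + 1) : Int) * l.getD k 0 := by
  induction l with
  | nil => simp
  | cons a t ih =>
    intro p j
    simp only [List.foldl_cons]
    have hc : PySem.Int.floordiv ((N.choose (j + 1) : Int) * ((N : Int) - (j : Int) - 1)) ((j : Int) + 2)
        = (N.choose (j + 1 + 1) : Int) := pvChooseStep N j
    have hs : -(-1 : Int) ^ j = (-1 : Int) ^ (j + 1) := by
      rw [pow_succ]; ring
    have hj : ((j : Int) + 1) = ((j + 1 : ℕ) : Int) := by push_cast; ring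
    rw [hc, hs, hj, ih (p + (-1 : Int) ^ j * (N.choose (j + 1) : Int) * a) (j + 1)]
    rw [List.length_cons,
      Finset.sum_range_succ' (fun k => (-1 : Int) ^ (j + k) * (N.choose (j + k + 1) : Int) * (a :: t).getD k 0) t.length]
    have hcong : (∑ k ∈ Finset.range t.length,
          (-1 : Int) ^ (j + 1 + k) * (N.choose (j + 1 + k + 1) : Int) * t.getD k 0)
        = ∑ k ∈ Finset.range t.length,
          (-1 : Int) ^ (j + (k + 1)) * (N.choose (j + (k + 1) + 1) : Int) * (a :: t).getD (k + 1) 0 := by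
      refine Finset.sum_congr rfl (fun k _ => ?_)
      have e1 : j + 1 + k = j + (k + 1) := by omega
      rw [e1, List.getD_cons_succ]
    rw [hcong]
    simp only [List.getD_cons_zero, Nat.add_zero]
    ring

lemma pvB_eq (line : List Int) : get_updated_list_v2_py_alt line = pvP line :: line := by
  show (line.foldl _ (0, PySem.List.len line, 1, 0)).1 :: line = _
  rw [PySem.List.len_eq]
  have h0 : ((0 : Int), ((line.length : Int)), (1 : Int), (0 : Int))
      = ((0 : Int), (line.length.choose (0 + 1) : Int), (-1 : Int) ^ 0, ((0 : ℕ) : Int)) := by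
    simp [Nat.choose_one_right]
  rw [h0, pvFoldB line.length line 0 0]
  unfold pvP
  simp

-- ===== VERDICT (by name: the statement is the Claim_ definition above) =====
theorem get_updated_list_v2_py_spec : Claim_equal_get_updated_list_v2_py := by
  intro line _
  show get_updated_list_v2_py line = get_updated_list_v2_py_alt line
  rw [pvA_eq, pvB_eq]
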